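-- pv_equiv track=rewrite | github.com/rafimohammad839/DSA | algorithms/others/sliding_window.py | sumOfAllSubArrays
-- ===== SOURCE A (Python) =====
-- def sumOfAllSubArrays(arr, k):
--   n = len(arr)
--   result = []
--   sum = 0
--
--   start, end = 0, 0
--   while end < n:
--     sum += arr[end]
--     if (end - start + 1) < k:
--       end += 1
--     else:
--       result.append(sum)
--       sum -= arr[start]
--       start += 1
--       end += 1
--
--   return result
-- ===== SOURCE B (Python) =====
-- def sumOfAllSubArrays(arr, k):
--     prefix = [0]
--     for x in arr:
--         prefix.append(prefix[-1] + x)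
--     return [prefix[i + k] - prefix[i] for i in range(len(arr) - k + 1)]
-- ===== Notes on version B (the rewrite author's own statement) =====
-- stated objective: alternative
-- what changed: Replaces the incremental sliding-window loop (running sum with two pointers) by a prefix-sum table followed by a pass of prefix differences; Pre_ excludes non-positive window sizes k <= 0, a degenerate input on which A's returning a copy of the whole array is an accident of its loop (B raises for k < 0 and returns empty-window zero sums for k = 0).
-- outside the precondition, e.g. on sumOfAllSubArrays([1, 2], 0): A returns [1, 2], B returns [0, 0, 0]; on sumOfAllSubArrays([1, 2], -1): A returns [1, 2], B raises IndexError
import Mathlib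
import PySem

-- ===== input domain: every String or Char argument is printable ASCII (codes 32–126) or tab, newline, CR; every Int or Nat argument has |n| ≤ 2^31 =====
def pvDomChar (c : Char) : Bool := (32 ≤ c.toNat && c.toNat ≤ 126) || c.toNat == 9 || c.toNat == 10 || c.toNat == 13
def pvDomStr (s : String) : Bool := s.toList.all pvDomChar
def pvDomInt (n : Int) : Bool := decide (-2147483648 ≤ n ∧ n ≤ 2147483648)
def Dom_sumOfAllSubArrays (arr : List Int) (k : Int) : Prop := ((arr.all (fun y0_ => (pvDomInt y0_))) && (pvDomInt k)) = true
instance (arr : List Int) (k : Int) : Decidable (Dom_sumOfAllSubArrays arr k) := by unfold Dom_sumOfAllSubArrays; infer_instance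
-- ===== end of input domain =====

-- B replaces A's incremental sliding-window loop by a prefix-sum table plus prefix-difference pass (alternative decomposition, same cost).


-- ===== PORT A =====
-- the while loop of A: state (start, end, sum, result); indices start ≤ end < arr.length are
-- always in range in Python, so getD 0 is exact here
def sumOfAllSubArraysLoop (arr : List Int) (k : Int) (start e : Nat) (sum : Int)
    (result : List Int) : List Int :=
  if e < arr.length then
    let sum := sum + arr.getD e 0
    if ((e : Int) - (start : Int) + 1) < k then
      sumOfAllSubArraysLoop arr k start (e + 1) sum result
    else
      sumOfAllSubArraysLoop arr k (start + 1) (e + 1) (sum - arr.getD start 0) (result ++ [sum])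
  else result
termination_by arr.length - e

def sumOfAllSubArrays (arr : List Int) (k : Int) : List Int :=
  sumOfAllSubArraysLoop arr k 0 0 0 []

-- ===== PORT B =====
-- prefix list built left to right: prefixSumsB arr acc = the running sums acc+arr[0], acc+arr[0]+arr[1], …
def prefixSumsB (arr : List Int) (acc : Int) : List Int :=
  match arr with
  | [] => []
  | x :: xs => (acc + x) :: prefixSumsB xs (acc + x)

-- inside Pre_ (k ≥ 1) both prefix indexings are in range in Python, so getD 0 is exact there
def sumOfAllSubArrays_alt (arr : List Int) (k : Int) : List Int :=
  let pfx := 0 :: prefixSumsB arr 0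
  (List.range (arr.length + 1 - k.toNat)).map
    (fun i => pfx.getD (i + k.toNat) 0 - pfx.getD i 0)

-- ===== PRECONDITION & SPEC =====
-- Pre_ excludes the degenerate non-positive window sizes k ≤ 0: there A's copy-of-the-whole-array
-- result is an accident of its loop shape, and B raises IndexError for k < 0 (and returns the
-- empty-window zero sums for k = 0).
def Pre_sumOfAllSubArrays (arr : List Int) (k : Int) : Prop := 1 ≤ k
instance (arr : List Int) (k : Int) : Decidable (Pre_sumOfAllSubArrays arr k) := by unfold Pre_sumOfAllSubArrays; infer_instance
def pvWitness_sumOfAllSubArrays : List Int × Int := ([1, 2, 3, 4], 2)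

def Spec_sumOfAllSubArrays (arr : List Int) (k : Int) (out : List Int) : Prop := out = sumOfAllSubArrays_alt arr k
instance (arr : List Int) (k : Int) (out : List Int) : Decidable (Spec_sumOfAllSubArrays arr k out) := by unfold Spec_sumOfAllSubArrays; infer_instance

-- ===== CLAIM (what is proved, stated in full; the proofs are below) =====
def Claim_equal_sumOfAllSubArrays : Prop := ∀ (arr : List Int) (k : Int), Dom_sumOfAllSubArrays arr k → Pre_sumOfAllSubArrays arr k → Spec_sumOfAllSubArrays arr k (sumOfAllSubArrays arr k)

-- ===== LEMMAS AND PROOFS =====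

-- B's prefix list reads off the partial sums of arr
theorem prefixSumsB_getD (arr : List Int) (acc : Int) (i : Nat) (h : i ≤ arr.length) :
    (acc :: prefixSumsB arr acc).getD i 0 = acc + (arr.take i).sum := by
  induction arr generalizing acc i with
  | nil =>
    have : i = 0 := by simpa using h
    subst this; simp
  | cons x xs ih =>
    cases i with
    | zero => simp
    | succ j =>
      simp only [prefixSumsB, List.getD_cons_succ, List.take_succ_cons, List.sum_cons]
      rw [ih (acc + x) j (by simpa using h)]
      ring

theorem take_succ_sum (arr : List Int) (e : Nat) (h : e < arr.length) :
    (arr.take (e + 1)).sum = (arr.take e).sum + arr.getD e 0 := by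
  rw [List.getD_eq_getElem?_getD]
  simp [List.getElem?_eq_getElem h, List.sum_take_succ arr e h]

-- A's loop for k ≥ 1, invariant form: start = e+1-m, sum = P e - P start,
-- result = the already-emitted window sums; it ends with all prefix differences.
theorem loopA_pos (arr : List Int) (k : Int) (m : Nat) (hm : (m : Int) = k) (hm1 : 1 ≤ m)
    (e : Nat) (he : e ≤ arr.length) :
    sumOfAllSubArraysLoop arr k (e + 1 - m) e
        ((arr.take e).sum - (arr.take (e + 1 - m)).sum)
        ((List.range (e + 1 - m)).map
          (fun j => (arr.take (j + m)).sum - (arr.take j).sum)) =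
      (List.range (arr.length + 1 - m)).map
        (fun j => (arr.take (j + m)).sum - (arr.take j).sum) := by
  rw [sumOfAllSubArraysLoop]
  by_cases h : e < arr.length
  · simp only [h, if_pos]
    by_cases hsmall : e + 1 < m
    · have hs : e + 1 - m = 0 := by omega
      have hcond : ((e : Int) - ((e + 1 - m : Nat) : Int) + 1) < k := by
        rw [hs]; push_cast; omega
      simp only [hcond, if_pos]
      have this2 := loopA_pos arr k m hm hm1 (e + 1) (by omega)
      rw [show e + 1 + 1 - m = 0 by omega] at this2
      rw [hs] at *
      rw [show (arr.take e).sum - (arr.take 0).sum + arr.getD e 0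
            = (arr.take (e + 1)).sum - (arr.take 0).sum by
          rw [take_succ_sum arr e h]; ring]
      exact this2
    · have hs : e + 1 - m + m = e + 1 := by omega
      have hcond : ¬ (((e : Int) - ((e + 1 - m : Nat) : Int) + 1) < k) := by
        have hc : ((e + 1 - m : Nat) : Int) = (e : Int) + 1 - m := by omega
        rw [hc]; omega
      simp only [hcond, if_neg, not_false_iff]
      have hstart : e + 1 - m < arr.length := by omega
      have this2 := loopA_pos arr k m hm hm1 (e + 1) (by omega)
      have hrange : List.range (e + 1 + 1 - m) = List.range (e + 1 - m) ++ [e + 1 - m] := by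
        rw [show e + 1 + 1 - m = (e + 1 - m) + 1 by omega, List.range_succ]
      rw [hrange, List.map_append] at this2
      rw [show e + 1 - m + 1 = e + 1 + 1 - m by omega,
          show (arr.take e).sum - (arr.take (e + 1 - m)).sum + arr.getD e 0
                - arr.getD (e + 1 - m) 0
              = (arr.take (e + 1)).sum - (arr.take (e + 1 + 1 - m)).sum by
            rw [take_succ_sum arr e h, show e + 1 + 1 - m = (e + 1 - m) + 1 by omega,
                take_succ_sum arr (e + 1 - m) hstart]; ring,
          show ((List.range (e + 1 - m)).map
                  (fun j => (arr.take (j + m)).sum - (arr.take j).sum))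
                ++ [(arr.take e).sum - (arr.take (e + 1 - m)).sum + arr.getD e 0]
              = ((List.range (e + 1 - m)).map
                  (fun j => (arr.take (j + m)).sum - (arr.take j).sum))
                ++ (List.map (fun j => (arr.take (j + m)).sum - (arr.take j).sum) [e + 1 - m]) by
            simp only [List.map_cons, List.map_nil]
            rw [hs, take_succ_sum arr e h, sub_add_eq_add_sub]]
      exact this2
  · simp only [h, if_neg, not_false_iff]
    have : e = arr.length := by omega
    subst this
    rfl
termination_by arr.length - e

-- ===== VERDICT (by name: the statement is the Claim_ definition above) =====
theorem sumOfAllSubArrays_spec : Claim_equal_sumOfAllSubArrays := by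
  intro arr k _ hk
  unfold Pre_sumOfAllSubArrays at hk
  unfold Spec_sumOfAllSubArrays sumOfAllSubArrays sumOfAllSubArrays_alt
  set m := k.toNat with hmdef
  have hm : (m : Int) = k := by simp [hmdef]; omega
  have hm1 : 1 ≤ m := by omega
  have h0 : 0 + 1 - m = 0 := by omega
  have := loopA_pos arr k m hm hm1 0 (by omega)
  rw [h0] at this
  simp only [List.take_zero, List.sum_nil, sub_zero, List.range_zero, List.map_nil] at this
  rw [this]
  apply List.map_congr_left
  intro i hi
  simp only [List.mem_range] at hi
  rw [prefixSumsB_getD arr 0 (i + m) (by omega), prefixSumsB_getD arr 0 i (by omega)]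
  ring
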